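-- pv_equiv track=rewrite | github.com/rtk-rnjn/Parrot | utilities/converters.py | to_bottom
-- ===== SOURCE A (Python) =====
-- CHARACTER_VALUES = {
--     200: "\N{PEOPLE HUGGING}",
--     50 : "\N{SPARKLING HEART}",
--     10 : "\N{SPARKLES}",
--     5  : "\N{FACE WITH PLEADING EYES}",
--     1  : ",",
--     0  : "\N{HEAVY BLACK HEART}",
-- }
--
-- SECTION_SEPERATOR = "\N{WHITE RIGHT POINTING BACKHAND INDEX}\N{WHITE LEFT POINTING BACKHAND INDEX}"
--
-- def to_bottom(text: str) -> str:
--     out = bytearray()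
--
--     for char in text.encode():
--         while char != 0:
--             for value, emoji in CHARACTER_VALUES.items():
--                 if char >= value:
--                     char -= value
--                     out += emoji.encode()
--                     break
--
--         out += SECTION_SEPERATOR.encode()
--
--     return out.decode("utf-8")
-- ===== SOURCE B (Python) =====
-- SECTION_SEPERATOR = "\N{WHITE RIGHT POINTING BACKHAND INDEX}\N{WHITE LEFT POINTING BACKHAND INDEX}"
--
-- _DENOMS = [
--     (200, "\N{PEOPLE HUGGING}"),
--     (50, "\N{SPARKLING HEART}"),
--     (10, "\N{SPARKLES}"),
--     (5, "\N{FACE WITH PLEADING EYES}"),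
--     (1, ","),
-- ]
--
-- def to_bottom(text: str) -> str:
--     parts = []
--     for char in text.encode():
--         for value, emoji in _DENOMS:
--             count, char = divmod(char, value)
--             parts.append(emoji * count)
--         parts.append(SECTION_SEPERATOR)
--     return "".join(parts)
-- ===== Notes on version B (the rewrite author's own statement) =====
-- stated objective: alternative
-- what changed: Per byte, replaces the `while char != 0` loop that repeatedly scans the denomination dict and subtracts one unit at a time with a single divmod pass over the descending denominations [200,50,10,5,1], dropping the unreachable 0/heart entry; the result is assembled by joining per-byte parts instead of mutating a bytearray.
import Mathlib
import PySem

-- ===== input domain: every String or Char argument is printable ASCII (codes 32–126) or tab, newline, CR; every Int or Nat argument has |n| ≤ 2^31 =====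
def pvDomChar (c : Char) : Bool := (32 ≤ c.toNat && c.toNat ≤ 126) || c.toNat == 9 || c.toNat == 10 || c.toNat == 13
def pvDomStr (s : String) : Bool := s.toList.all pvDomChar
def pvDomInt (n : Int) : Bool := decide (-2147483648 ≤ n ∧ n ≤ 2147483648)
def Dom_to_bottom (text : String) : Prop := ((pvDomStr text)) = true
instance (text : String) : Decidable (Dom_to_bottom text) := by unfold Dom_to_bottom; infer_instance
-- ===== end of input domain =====

-- B replaces A's repeated-subtraction while loop by one divmod pass over the denominations (alternative decomposition, same cost).
-- On the printable-ASCII domain text.encode()/decode() round-trips byte-per-char, so both ports work on char codes and Strings.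

-- ===== PORT A =====
def pvSep : String := "👉👈"

-- CHARACTER_VALUES.items(), in insertion order
def pvItems : List (Nat × String) := [(200, "🫂"), (50, "💖"), (10, "✨"), (5, "🥺"), (1, ","), (0, "❤")]

-- the inner 'for … break': first (value, emoji) with char ≥ value
def pvFirstFit (c : Nat) : List (Nat × String) → Nat × String
  | [] => (0, "")   -- never reached for c ≠ 0 on pvItems (value 1 always fits)
  | (v, e) :: rest => if c ≥ v then (v, e) else pvFirstFit c rest

-- the 'while char != 0' loop; fuel = initial char suffices since each step subtracts ≥ 1
def pvInnerA (fuel c : Nat) : String :=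
  match fuel with
  | 0 => ""
  | f + 1 =>
    if c = 0 then ""
    else
      let p := pvFirstFit c pvItems
      p.2 ++ pvInnerA f (c - p.1)

def to_bottom (text : String) : String :=
  -- text.encode(): on the ASCII domain the bytes are the char codes (exact there)
  text.toList.foldl (fun out ch => out ++ (pvInnerA ch.toNat ch.toNat ++ pvSep)) ""

-- ===== PORT B =====
def pvDenoms : List (Nat × String) := [(200, "🫂"), (50, "💖"), (10, "✨"), (5, "🥺"), (1, ",")]

-- emoji * count
def pvRep (s : String) (n : Nat) : String := String.join (List.replicate n s)

-- one divmod pass over the denominations for a single byte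
def pvCharB (c : Nat) : String :=
  (pvDenoms.foldl (fun st ve => (st.1 % ve.1, st.2 ++ pvRep ve.2 (st.1 / ve.1))) (c, "")).2

def to_bottom_alt (text : String) : String :=
  String.join (text.toList.map (fun ch => pvCharB ch.toNat ++ pvSep))

-- ===== PRECONDITION & SPEC =====
def Spec_to_bottom (text : String) (out : String) : Prop := out = to_bottom_alt text
instance (text : String) (out : String) : Decidable (Spec_to_bottom text out) := by unfold Spec_to_bottom; infer_instance

-- ===== CLAIM (what is proved, stated in full; the proofs are below) =====
def Claim_equal_to_bottom : Prop := ∀ (text : String), Dom_to_bottom text → Spec_to_bottom text (to_bottom text)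

-- ===== LEMMAS AND PROOFS =====

theorem pv_char_eq : ∀ c < 127, pvInnerA c c = pvCharB c := by decide

theorem pv_foldl_join (g : Char → String) (l : List Char) (acc : String) :
    l.foldl (fun out ch => out ++ g ch) acc = acc ++ String.join (l.map g) := by
  induction l generalizing acc with
  | nil => simp [String.join]
  | cons a t ih =>
    have h1 := ih (acc ++ g a)
    have h2 := ih (g a)
    simp [List.foldl, String.join, List.map] at h1 h2 ⊢
    rw [h1]
    conv_rhs => rw [List.foldl_map]
    rw [h2, String.append_assoc]

-- ===== VERDICT (by name: the statement is the Claim_ definition above) =====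
theorem to_bottom_spec : Claim_equal_to_bottom := by
  intro text hdom
  unfold Spec_to_bottom to_bottom to_bottom_alt
  rw [pv_foldl_join]
  have hmap : text.toList.map (fun ch => pvInnerA ch.toNat ch.toNat ++ pvSep)
      = text.toList.map (fun ch => pvCharB ch.toNat ++ pvSep) := by
    apply List.map_congr_left
    intro ch hch
    have hc : pvDomChar ch = true := by
      have := List.all_eq_true.mp hdom ch hch
      simpa using this
    have hlt : ch.toNat < 127 := by
      simp [pvDomChar] at hc
      omega
    rw [pv_char_eq ch.toNat hlt]
  rw [hmap]
  simp
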